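-- pv_equiv track=rewrite | github.com/XBlab-Bioinfo/AviTag-seq | AviTag-Seq/visualization.py | onTargetsTop
-- ===== SOURCE A (Python) =====
-- def onTargetsTop(offtargets, ref_seq, split_char):
--     tempSeq_front = ref_seq.split(split_char)[0]
--     tempSeq_end = ref_seq.split(split_char)[1]
--     offtarget_off, offtarget_on = [], []
--     for target in offtargets:
--         if target["seq"][:len(tempSeq_front)] == tempSeq_front and target["seq"][len(tempSeq_front)+1:] == tempSeq_end:
--             offtarget_on.append(target)
--         else:
--             offtarget_off.append(target)
--     return offtarget_on + offtarget_off
-- ===== SOURCE B (Python) =====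
-- def onTargetsTop(offtargets, ref_seq, split_char):
--     parts = ref_seq.split(split_char)
--     front, end = parts[0], parts[1]
--     return sorted(
--         offtargets,
--         key=lambda t: not (t["seq"][:len(front)] == front
--                            and t["seq"][len(front)+1:] == end),
--     )
-- ===== Notes on version B (the rewrite author's own statement) =====
-- stated objective: idiomatic
-- what changed: Replaces the manual two-list partition-and-concatenate loop with a single stable sort on the boolean match key (matching entries keep their order first, non-matching after).
import Mathlib
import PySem

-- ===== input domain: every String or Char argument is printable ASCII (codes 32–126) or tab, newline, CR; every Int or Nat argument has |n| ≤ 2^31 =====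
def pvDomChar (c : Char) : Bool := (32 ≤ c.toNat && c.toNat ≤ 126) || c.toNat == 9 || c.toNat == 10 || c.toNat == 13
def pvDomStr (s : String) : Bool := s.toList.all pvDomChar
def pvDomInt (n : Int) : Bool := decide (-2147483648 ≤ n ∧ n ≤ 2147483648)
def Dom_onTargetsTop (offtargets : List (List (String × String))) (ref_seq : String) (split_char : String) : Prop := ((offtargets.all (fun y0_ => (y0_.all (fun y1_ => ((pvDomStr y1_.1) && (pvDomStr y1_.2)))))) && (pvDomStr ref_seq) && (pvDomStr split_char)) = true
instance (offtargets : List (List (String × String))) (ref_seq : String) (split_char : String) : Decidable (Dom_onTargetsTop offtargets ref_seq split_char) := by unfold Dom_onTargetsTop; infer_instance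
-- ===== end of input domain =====

-- B replaces A's manual two-list partition with a single stable sort on the boolean
-- match key (idiomatic one-liner); same return value, no mutation in either version.

-- the match predicate shared by both Pythons, literally:
-- target["seq"][:len(front)] == front and target["seq"][len(front)+1:] == end
def pvMatch (front endp : String) (target : List (String × String)) : Bool :=
  let s := ((PySem.Dict.mk target).get? "seq").getD ""
  (PySem.Str.slice s none (some (PySem.Str.len front)) == front) &&
  (PySem.Str.slice s (some (PySem.Str.len front + 1)) none == endp)

-- ===== PORT A =====
def onTargetsTop (offtargets : List (List (String × String))) (ref_seq : String) (split_char : String) : List (List (String × String)) :=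
  let tempSeq_front := PySem.List.pyGetD ((PySem.Str.split? ref_seq split_char).getD []) 0 ""
  let tempSeq_end := PySem.List.pyGetD ((PySem.Str.split? ref_seq split_char).getD []) 1 ""
  let r := offtargets.foldl
    (fun (acc : List (List (String × String)) × List (List (String × String))) target =>
      if pvMatch tempSeq_front tempSeq_end target then (acc.1, acc.2 ++ [target])
      else (acc.1 ++ [target], acc.2))
    ([], [])
  r.2 ++ r.1

-- ===== PORT B =====
def onTargetsTop_alt (offtargets : List (List (String × String))) (ref_seq : String) (split_char : String) : List (List (String × String)) :=
  let parts := (PySem.Str.split? ref_seq split_char).getD []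
  let front := PySem.List.pyGetD parts 0 ""
  let endp := PySem.List.pyGetD parts 1 ""
  PySem.List.sorted offtargets (fun t => !(pvMatch front endp t)) false

-- ===== PRECONDITION & SPEC =====
-- Pre_ excludes exactly the inputs on which Python A raises: split_char = "" (ValueError),
-- ref_seq.split(split_char) having fewer than 2 pieces (IndexError), and a target with no
-- "seq" key (KeyError); B raises identically there.
def Pre_onTargetsTop (offtargets : List (List (String × String))) (ref_seq : String) (split_char : String) : Prop :=
  split_char ≠ "" ∧
  2 ≤ ((PySem.Str.split? ref_seq split_char).getD []).length ∧
  offtargets.all (fun t => ((PySem.Dict.mk t).get? "seq").isSome) = true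

instance (offtargets : List (List (String × String))) (ref_seq : String) (split_char : String) : Decidable (Pre_onTargetsTop offtargets ref_seq split_char) := by unfold Pre_onTargetsTop; infer_instance

def pvWitness_onTargetsTop : (List (List (String × String))) × String × String :=
  ([[("seq", "AXB")], [("seq", "CD")]], "A|B", "|")

def Spec_onTargetsTop (offtargets : List (List (String × String))) (ref_seq : String) (split_char : String) (out : List (List (String × String))) : Prop := out = onTargetsTop_alt offtargets ref_seq split_char
instance (offtargets : List (List (String × String))) (ref_seq : String) (split_char : String) (out : List (List (String × String))) : Decidable (Spec_onTargetsTop offtargets ref_seq split_char out) := by unfold Spec_onTargetsTop; infer_instance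

-- ===== CLAIM (what is proved, stated in full; the proofs are below) =====
def Claim_equal_onTargetsTop : Prop := ∀ (offtargets : List (List (String × String))) (ref_seq : String) (split_char : String), Dom_onTargetsTop offtargets ref_seq split_char → Pre_onTargetsTop offtargets ref_seq split_char → Spec_onTargetsTop offtargets ref_seq split_char (onTargetsTop offtargets ref_seq split_char)

-- ===== LEMMAS AND PROOFS =====

-- inserting x past a block of elements it does not go before
theorem pv_insertBy_append {α : Type} (bef : α → α → Bool) (x : α) (A B : List α)
    (hA : ∀ y ∈ A, bef x y = false) :
    PySem.List.insertBy bef x (A ++ B) = A ++ PySem.List.insertBy bef x B := by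
  induction A with
  | nil => simp
  | cons a A ih =>
    have ha : bef x a = false := hA a (by simp)
    simp only [List.cons_append, PySem.List.insertBy, ha]
    simp only [Bool.false_eq_true, if_false]
    rw [ih (fun y hy => hA y (by simp [hy]))]

-- inserting x into a block it never goes before appends it at the end
theorem pv_insertBy_last {α : Type} (bef : α → α → Bool) (x : α) (B : List α)
    (hB : ∀ y ∈ B, bef x y = false) :
    PySem.List.insertBy bef x B = B ++ [x] := by
  induction B with
  | nil => rfl
  | cons b B ih =>
    have hb : bef x b = false := hB b (by simp)
    simp only [PySem.List.insertBy, hb, Bool.false_eq_true, if_false]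
    rw [ih (fun y hy => hB y (by simp [hy]))]
    rfl

-- where a stable insertion by a Boolean key puts one element
theorem pv_insert_bool {α : Type} (k : α → Bool) (x : α) (A B : List α)
    (hA : ∀ y ∈ A, k y = false) (hB : ∀ y ∈ B, k y = true) :
    PySem.List.insertBy (fun a b => decide (k a < k b)) x (A ++ B) =
      if k x then A ++ (B ++ [x]) else (A ++ [x]) ++ B := by
  by_cases hx : k x = true
  · rw [pv_insertBy_last]
    · simp [hx]
    · intro y hy
      rcases List.mem_append.mp hy with h | h
      · simp [hx, hA y h]
      · simp [hx, hB y h]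
  · have hx' : k x = false := by simpa using hx
    rw [pv_insertBy_append _ _ _ _ (fun y hy => by simp [hx', hA y hy])]
    cases B with
    | nil => simp [hx', pv_insertBy_last]
    | cons b B =>
      have hb : k b = true := hB b (by simp)
      simp only [PySem.List.insertBy, hx', hb]
      simp [hx']

-- the insertion-sort fold with a Boolean key is the stable partition
theorem pv_foldl_insert_bool {α : Type} (k : α → Bool) (xs A B : List α)
    (hA : ∀ y ∈ A, k y = false) (hB : ∀ y ∈ B, k y = true) :
    xs.foldl (fun acc x => PySem.List.insertBy (fun a b => decide (k a < k b)) x acc) (A ++ B) =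
      (A ++ xs.filter (fun x => !k x)) ++ (B ++ xs.filter k) := by
  induction xs generalizing A B with
  | nil => simp
  | cons x xs ih =>
    simp only [List.foldl_cons]
    rw [pv_insert_bool k x A B hA hB]
    by_cases hx : k x = true
    · rw [if_pos hx]
      have hB' : ∀ y ∈ B ++ [x], k y = true := by
        intro y hy
        rcases List.mem_append.mp hy with h | h
        · exact hB y h
        · simp at h; subst h; exact hx
      rw [ih A (B ++ [x]) hA hB']
      simp [hx, List.filter_cons]
    · have hx' : k x = false := by simpa using hx
      rw [if_neg hx]
      have hA' : ∀ y ∈ A ++ [x], k y = false := by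
        intro y hy
        rcases List.mem_append.mp hy with h | h
        · exact hA y h
        · simp at h; subst h; exact hx'
      rw [ih (A ++ [x]) B hA' hB]
      simp [hx', List.filter_cons]

theorem pv_sorted_bool {α : Type} (k : α → Bool) (xs : List α) :
    PySem.List.sorted xs k false = xs.filter (fun x => !k x) ++ xs.filter k := by
  rw [PySem.List.sorted_eq_foldl_insertBy]
  simpa using pv_foldl_insert_bool k xs [] [] (by simp) (by simp)

-- A's partition fold, characterised
theorem pv_foldl_partition {α : Type} (p : α → Bool) (xs off on : List α) :
    xs.foldl (fun acc t => if p t then (acc.1, acc.2 ++ [t]) else (acc.1 ++ [t], acc.2)) (off, on) =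
      (off ++ xs.filter (fun t => !p t), on ++ xs.filter p) := by
  induction xs generalizing off on with
  | nil => simp
  | cons x xs ih =>
    by_cases hx : p x = true
    · simp [List.foldl_cons, hx, ih, List.filter_cons]
    · have hx' : p x = false := by simpa using hx
      simp [List.foldl_cons, hx', ih, List.filter_cons]

-- ===== VERDICT (by name: the statement is the Claim_ definition above) =====
theorem onTargetsTop_spec : Claim_equal_onTargetsTop := by
  intro offtargets ref_seq split_char _ _
  unfold Spec_onTargetsTop onTargetsTop onTargetsTop_alt
  dsimp only
  rw [pv_foldl_partition, pv_sorted_bool]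
  simp
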